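-- pv_equiv track=rewrite | github.com/psemow/bvshka | math/combinatorics.py | words_not_starting_with
-- ===== SOURCE A (Python) =====
-- from math import factorial
-- from collections import Counter
--
-- def perm_multinomial(word):
--     cnt = Counter(word)
--     total = factorial(len(word))
--     for v in cnt.values():
--         total //= factorial(v)
--     return total
--
-- def words_not_starting_with(word, forbidden):
--     total = perm_multinomial(word)
--     for ch in forbidden:
--         if ch in word:
--             cnt = Counter(word)
--             cnt[ch] -= 1
--             sub = factorial(len(word)-1)
--             for v in cnt.values():
--                 sub //= factorial(v)
--             total -= sub
--     return total
-- ===== SOURCE B (Python) =====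
-- from math import factorial
-- from collections import Counter
--
-- def words_not_starting_with(word, forbidden):
--     cnt = Counter(word)
--     n = len(word)
--     denom = 1
--     for v in cnt.values():
--         denom *= factorial(v)
--     total = factorial(n) // denom
--     if n == 0:
--         return total
--     hits = sum(cnt[ch] for ch in forbidden)
--     return total - total * hits // n
-- ===== Notes on version B (the rewrite author's own statement) =====
-- stated objective: faster
-- what changed: B never computes a per-forbidden-letter multinomial at all: it aggregates all forbidden occurrences into one hit count (sum of word-counts over the characters of forbidden) and removes them with the single exact formula total - total*hits//n, where A rebuilds a Counter and redoes the whole chain of factorial floor-divisions for every forbidden character.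
import Mathlib
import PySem

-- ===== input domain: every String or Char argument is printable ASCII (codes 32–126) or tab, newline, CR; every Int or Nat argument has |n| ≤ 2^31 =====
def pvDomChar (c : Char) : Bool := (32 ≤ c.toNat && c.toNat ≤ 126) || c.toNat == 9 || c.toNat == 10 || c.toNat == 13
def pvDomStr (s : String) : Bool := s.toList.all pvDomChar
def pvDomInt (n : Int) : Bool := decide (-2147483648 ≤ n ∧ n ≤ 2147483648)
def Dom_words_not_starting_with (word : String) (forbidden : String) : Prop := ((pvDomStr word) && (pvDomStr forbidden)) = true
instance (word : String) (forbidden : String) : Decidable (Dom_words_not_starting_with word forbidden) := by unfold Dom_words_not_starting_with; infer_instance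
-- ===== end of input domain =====

-- B never computes a per-forbidden-letter multinomial: it aggregates all forbidden occurrences
-- into one hit count and removes them with the single exact formula total - total*hits//n;
-- return values are identical on all inputs.

-- ===== PORT A =====
def perm_multinomial (word : String) : Int :=
  let cnt := PySem.Dict.counter word.toList            -- Counter(word)
  let total : Int := ((Nat.factorial word.toList.length : Nat) : Int)
  cnt.values.foldl (fun t v => PySem.Int.floordiv t ((Nat.factorial v.toNat : Nat) : Int)) total

def words_not_starting_with (word : String) (forbidden : String) : Int :=
  let total := perm_multinomial word
  forbidden.toList.foldl (fun total ch =>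
    if word.toList.contains ch then                    -- 'ch in word' (ch is a single character)
      let cnt := PySem.Dict.counter word.toList
      let cnt := cnt.insert ch (cnt.getD ch 0 - 1)     -- cnt[ch] -= 1
      let sub : Int := ((Nat.factorial (word.toList.length - 1) : Nat) : Int)
      total - cnt.values.foldl (fun s v => PySem.Int.floordiv s ((Nat.factorial v.toNat : Nat) : Int)) sub
    else total) total

-- ===== PORT B =====
def words_not_starting_with_alt (word : String) (forbidden : String) : Int :=
  let cnt := PySem.Dict.counter word.toList
  let n := word.toList.length
  let denom : Int := cnt.values.foldl (fun d v => d * ((Nat.factorial v.toNat : Nat) : Int)) 1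
  let total := PySem.Int.floordiv ((Nat.factorial n : Nat) : Int) denom
  if n = 0 then total
  else
    let hits : Int := (forbidden.toList.map (fun ch => cnt.getD ch 0)).sum
    total - PySem.Int.floordiv (total * hits) (n : Int)

-- ===== PRECONDITION & SPEC =====
def Spec_words_not_starting_with (word : String) (forbidden : String) (out : Int) : Prop := out = words_not_starting_with_alt word forbidden
instance (word : String) (forbidden : String) (out : Int) : Decidable (Spec_words_not_starting_with word forbidden out) := by unfold Spec_words_not_starting_with; infer_instance

-- ===== CLAIM (what is proved, stated in full; the proofs are below) =====
def Claim_equal_words_not_starting_with : Prop := ∀ (word : String) (forbidden : String), Dom_words_not_starting_with word forbidden → Spec_words_not_starting_with word forbidden (words_not_starting_with word forbidden)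

-- ===== LEMMAS AND PROOFS =====

-- distinct letters of the word, and the common factorial denominator
def pvKeys (N : List Char) : List Char := PySem.Set.ofList N
def pvDenom (N : List Char) : Nat := ((pvKeys N).map (fun k => Nat.factorial (N.count k))).prod
-- denominator after decrementing the count of ch
def pvDenom' (N : List Char) (ch : Char) : Nat :=
  ((pvKeys N).map (fun k => if k = ch then Nat.factorial (N.count k - 1) else Nat.factorial (N.count k))).prod
-- A's per-character deduction (0 when ch does not occur in the word)
def pvT (N : List Char) (ch : Char) : Nat :=
  if ch ∈ N then Nat.factorial (N.length - 1) / pvDenom' N ch else 0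

lemma values_counter (N : List Char) :
    (PySem.Dict.counter N).values = (pvKeys N).map (fun k => (N.count k : Int)) := by
  simp [PySem.Dict.values, PySem.Dict.items_counter, pvKeys, List.map_map, Function.comp]

lemma foldl_floordiv_facts (vs : List Int) (a : Nat) :
    vs.foldl (fun t v => PySem.Int.floordiv t ((Nat.factorial v.toNat : Nat) : Int)) (a : Int)
      = ((a / (vs.map (fun v => Nat.factorial v.toNat)).prod : Nat) : Int) := by
  induction vs generalizing a with
  | nil => simp
  | cons v t ih =>
      simp only [List.foldl_cons, PySem.Int.floordiv_natCast, ih, List.map_cons, List.prod_cons]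
      rw [Nat.div_div_eq_div_mul]

lemma foldl_mul_facts (vs : List Int) (b : Int) :
    vs.foldl (fun d v => d * ((Nat.factorial v.toNat : Nat) : Int)) b
      = b * (((vs.map (fun v => Nat.factorial v.toNat)).prod : Nat) : Int) := by
  induction vs generalizing b with
  | nil => simp
  | cons v t ih =>
      simp only [List.foldl_cons, List.map_cons, List.prod_cons, ih]
      push_cast
      ring

lemma map_toNat_count (N : List Char) :
    ((pvKeys N).map (fun k => (N.count k : Int))).map (fun v => Nat.factorial v.toNat)
      = (pvKeys N).map (fun k => Nat.factorial (N.count k)) := by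
  simp [List.map_map, Function.comp]

lemma perm_multinomial_eq (word : String) :
    perm_multinomial word = ((Nat.factorial word.toList.length / pvDenom word.toList : Nat) : Int) := by
  unfold perm_multinomial
  show (PySem.Dict.counter word.toList).values.foldl
      (fun t v => PySem.Int.floordiv t ((Nat.factorial v.toNat : Nat) : Int))
      ((Nat.factorial word.toList.length : Nat) : Int) = _
  rw [values_counter, foldl_floordiv_facts, map_toNat_count]
  rfl

lemma prod_split {α : Type} [DecidableEq α] (ks : List α) (hnd : ks.Nodup) (ch : α)
    (hch : ch ∈ ks) (f g : α → Nat) (m : Nat)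
    (hne : ∀ k, k ≠ ch → f k = g k) (hc : f ch = m * g ch) :
    (ks.map f).prod = m * (ks.map g).prod := by
  induction ks with
  | nil => cases hch
  | cons k t ih =>
      rcases List.nodup_cons.mp hnd with ⟨hk, hnt⟩
      simp only [List.map_cons, List.prod_cons]
      rcases List.mem_cons.mp hch with h | h
      · subst h
        have : t.map f = t.map g := List.map_congr_left (fun x hx => hne x (fun e => hk (e ▸ hx)))
        rw [this, hc]; ring
      · rw [hne k (fun e => hk (e ▸ h)), ih hnt h]
        ring

lemma denom_split (N : List Char) (ch : Char) (hch : ch ∈ N) :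
    pvDenom N = N.count ch * pvDenom' N ch := by
  refine prod_split (pvKeys N) (PySem.Set.nodup_ofList N) ch ((PySem.Set.mem_ofList _ _).mpr hch)
    _ _ (N.count ch) (fun k hk => by simp [hk]) ?_
  rw [if_pos rfl]
  have h1 : 1 ≤ N.count ch := List.one_le_count_iff.mpr hch
  rw [show N.count ch = (N.count ch - 1) + 1 by omega, Nat.factorial_succ]
  congr 2

-- A's inner per-letter computation equals (n-1)! / pvDenom' (for ch ∈ N)
lemma sub_eq (N : List Char) (ch : Char) (hch : ch ∈ N) :
    (((PySem.Dict.counter N).insert ch ((PySem.Dict.counter N).getD ch 0 - 1)).values.foldl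
        (fun s v => PySem.Int.floordiv s ((Nat.factorial v.toNat : Nat) : Int))
        ((Nat.factorial (N.length - 1) : Nat) : Int))
      = ((Nat.factorial (N.length - 1) / pvDenom' N ch : Nat) : Int) := by
  have hcont : (PySem.Dict.counter N).contains ch = true := by
    rw [PySem.Dict.contains_counter]; simpa using hch
  have hval : ((PySem.Dict.counter N).insert ch ((PySem.Dict.counter N).getD ch 0 - 1)).values
      = (pvKeys N).map (fun k => if k = ch then ((N.count ch : Int) - 1) else (N.count k : Int)) := by
    simp only [PySem.Dict.values, PySem.Dict.getD_counter,
      PySem.Dict.items_insert_of_contains _ _ hcont, PySem.Dict.items_counter, List.map_map]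
    refine List.map_congr_left (fun k hk => ?_)
    by_cases hkch : k = ch
    · subst hkch; simp [Function.comp]
    · simp [Function.comp, hkch]
  rw [hval, foldl_floordiv_facts]
  have hprod : (((pvKeys N).map (fun k => if k = ch then ((N.count ch : Int) - 1) else (N.count k : Int))).map
        (fun v => Nat.factorial v.toNat)).prod = pvDenom' N ch := by
    rw [List.map_map]
    unfold pvDenom'
    refine congrArg List.prod (List.map_congr_left (fun k hk => ?_))
    by_cases hkch : k = ch
    · subst hkch
      simp only [Function.comp_apply, if_true]
      congr 1
      omega
    · simp [Function.comp, hkch]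
  rw [hprod]

lemma foldl_sub_eq_sum {α : Type} (l : List α) (f : α → Int) (t : Int) :
    l.foldl (fun acc x => acc - f x) t = t - (l.map f).sum := by
  induction l generalizing t with
  | nil => simp
  | cons x xs ih => simp [ih]; ring

-- pvDenom as a Finset product, and the multinomial divisibilities
lemma keys_toFinset (N : List Char) : (pvKeys N).toFinset = N.toFinset := by
  ext k
  simp [pvKeys, List.mem_toFinset, PySem.Set.mem_ofList]

lemma pvDenom_finset (N : List Char) :
    pvDenom N = ∏ k ∈ N.toFinset, Nat.factorial (N.count k) := by
  have hnd : (pvKeys N).Nodup := PySem.Set.nodup_ofList N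
  rw [← keys_toFinset, List.prod_toFinset _ hnd]
  rfl

lemma sum_count_toFinset (N : List Char) : ∑ k ∈ N.toFinset, N.count k = N.length := by
  simp


lemma denom_dvd (N : List Char) : pvDenom N ∣ Nat.factorial N.length := by
  rw [pvDenom_finset, ← sum_count_toFinset N]
  exact Nat.prod_factorial_dvd_factorial_sum _ _

lemma pvDenom'_finset (N : List Char) (ch : Char) :
    pvDenom' N ch = ∏ k ∈ N.toFinset,
      Nat.factorial (if k = ch then N.count k - 1 else N.count k) := by
  have hnd : (pvKeys N).Nodup := PySem.Set.nodup_ofList N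
  rw [← keys_toFinset, List.prod_toFinset _ hnd]
  unfold pvDenom'
  refine congrArg List.prod (List.map_congr_left (fun k _ => ?_))
  by_cases h : k = ch <;> simp [h]

lemma denom'_dvd (N : List Char) (ch : Char) (hch : ch ∈ N) :
    pvDenom' N ch ∣ Nat.factorial (N.length - 1) := by
  have hsum : ∑ k ∈ N.toFinset, (if k = ch then N.count k - 1 else N.count k) = N.length - 1 := by
    have hmem : ch ∈ N.toFinset := List.mem_toFinset.mpr hch
    rw [← Finset.add_sum_erase _ _ hmem, if_pos rfl]
    have h2 : ∑ k ∈ N.toFinset.erase ch, (if k = ch then N.count k - 1 else N.count k)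
        = ∑ k ∈ N.toFinset.erase ch, N.count k := by
      refine Finset.sum_congr rfl (fun k hk => ?_)
      rw [if_neg (Finset.ne_of_mem_erase hk)]
    rw [h2]
    have h3 : N.count ch + ∑ k ∈ N.toFinset.erase ch, N.count k = N.length := by
      rw [Finset.add_sum_erase _ (fun k => N.count k) hmem]
      exact sum_count_toFinset N
    have h1 : 1 ≤ N.count ch := List.one_le_count_iff.mpr hch
    omega
  rw [pvDenom'_finset, ← hsum]
  exact Nat.prod_factorial_dvd_factorial_sum _ _

-- the key arithmetic: total * count ch = n * (A's deduction for ch), for every ch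
lemma total_mul_count (N : List Char) (ch : Char) :
    (Nat.factorial N.length / pvDenom N) * N.count ch = N.length * pvT N ch := by
  by_cases hch : ch ∈ N
  · have hc : 0 < N.count ch := List.count_pos_iff.mpr hch
    have hn : 0 < N.length := List.length_pos_of_mem hch
    obtain ⟨m, hm⟩ := denom'_dvd N ch hch
    have hD' : 0 < pvDenom' N ch := by
      rcases Nat.eq_zero_or_pos (pvDenom' N ch) with h0 | h
      · exfalso
        rw [h0, Nat.zero_mul] at hm
        exact Nat.factorial_ne_zero _ hm
      · exact h
    have hTm : pvT N ch = m := by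
      unfold pvT
      rw [if_pos hch, hm, Nat.mul_div_cancel_left _ hD']
    have e : N.length - 1 + 1 = N.length := Nat.succ_pred_eq_of_pos hn
    have h1 : Nat.factorial N.length = N.length * Nat.factorial (N.length - 1) := by
      conv_lhs => rw [← e]
      rw [Nat.factorial_succ, e]
    have hfac : Nat.factorial N.length = pvDenom' N ch * (N.length * m) := by
      rw [h1, hm]
      ring
    have hdvd : N.count ch ∣ N.length * m := by
      have hd := denom_dvd N
      rw [denom_split N ch hch, hfac] at hd
      rcases hd with ⟨q, hq⟩
      refine ⟨q, Nat.eq_of_mul_eq_mul_left hD' ?_⟩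
      calc pvDenom' N ch * (N.length * m) = N.count ch * pvDenom' N ch * q := hq
        _ = pvDenom' N ch * (N.count ch * q) := by ring
    have htot : Nat.factorial N.length / pvDenom N = N.length * m / N.count ch := by
      rw [denom_split N ch hch, hfac,
        show pvDenom' N ch * (N.length * m) = (N.length * m) * pvDenom' N ch by ring,
        Nat.mul_div_mul_right _ _ hD']
    rw [htot, hTm, Nat.div_mul_cancel hdvd]
  · have hc : N.count ch = 0 := List.count_eq_zero.mpr hch
    unfold pvT
    rw [hc, if_neg hch]
    simp

lemma sum_hits (N L : List Char) :
    (Nat.factorial N.length / pvDenom N) * (L.map (fun ch => N.count ch)).sum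
      = N.length * (L.map (pvT N)).sum := by
  induction L with
  | nil => simp
  | cons ch t ih =>
      simp only [List.map_cons, List.sum_cons, Nat.mul_add]
      rw [total_mul_count, ih]

lemma sum_map_natCast (L : List Char) (f : Char → Nat) :
    (L.map (fun ch => ((f ch : Nat) : Int))).sum = (((L.map f).sum : Nat) : Int) := by
  induction L with
  | nil => simp
  | cons ch t ih => simp [ih]

-- ===== VERDICT (by name: the statement is the Claim_ definition above) =====
theorem words_not_starting_with_spec : Claim_equal_words_not_starting_with := by
  intro word forbidden _
  unfold Spec_words_not_starting_with words_not_starting_with words_not_starting_with_alt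
  show (forbidden.toList.foldl (fun total ch =>
      if word.toList.contains ch then
        total - (((PySem.Dict.counter word.toList).insert ch ((PySem.Dict.counter word.toList).getD ch 0 - 1)).values.foldl
          (fun s v => PySem.Int.floordiv s ((Nat.factorial v.toNat : Nat) : Int))
          ((Nat.factorial (word.toList.length - 1) : Nat) : Int))
      else total) (perm_multinomial word))
    = (if word.toList.length = 0 then
        PySem.Int.floordiv ((Nat.factorial word.toList.length : Nat) : Int)
          ((PySem.Dict.counter word.toList).values.foldl (fun d v => d * ((Nat.factorial v.toNat : Nat) : Int)) 1)
      else
        PySem.Int.floordiv ((Nat.factorial word.toList.length : Nat) : Int)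
          ((PySem.Dict.counter word.toList).values.foldl (fun d v => d * ((Nat.factorial v.toNat : Nat) : Int)) 1)
        - PySem.Int.floordiv
            (PySem.Int.floordiv ((Nat.factorial word.toList.length : Nat) : Int)
              ((PySem.Dict.counter word.toList).values.foldl (fun d v => d * ((Nat.factorial v.toNat : Nat) : Int)) 1)
             * (forbidden.toList.map (fun ch => (PySem.Dict.counter word.toList).getD ch 0)).sum)
            ((word.toList.length : Nat) : Int))
  rw [values_counter, foldl_mul_facts, one_mul, map_toNat_count, perm_multinomial_eq]
  set N := word.toList with hN
  set L := forbidden.toList with hL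
  have hdiv : PySem.Int.floordiv ((Nat.factorial N.length : Nat) : Int)
      ((((pvKeys N).map fun k => Nat.factorial (N.count k)).prod : Nat) : Int)
      = ((Nat.factorial N.length / pvDenom N : Nat) : Int) := by
    rw [PySem.Int.floordiv_natCast]
    rfl
  rw [hdiv]
  have hstep : ∀ (acc : Int), ∀ ch ∈ L,
      (if N.contains ch then
        acc - (((PySem.Dict.counter N).insert ch ((PySem.Dict.counter N).getD ch 0 - 1)).values.foldl
          (fun s v => PySem.Int.floordiv s ((Nat.factorial v.toNat : Nat) : Int))
          ((Nat.factorial (N.length - 1) : Nat) : Int))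
       else acc) = acc - ((pvT N ch : Nat) : Int) := by
    intro acc ch _
    by_cases h : ch ∈ N
    · rw [if_pos (by simpa using h), sub_eq N ch h]
      unfold pvT
      rw [if_pos h]
    · rw [if_neg (by simpa using h)]
      unfold pvT
      rw [if_neg h]
      simp
  rw [PySem.List.foldl_congr_mem _ _ _ _ hstep, foldl_sub_eq_sum]
  by_cases hn : N.length = 0
  · rw [if_pos hn]
    have hz : L.map (fun ch => ((pvT N ch : Nat) : Int)) = L.map (fun _ => (0 : Int)) := by
      refine List.map_congr_left (fun ch _ => ?_)
      have hnm : ch ∉ N := by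
        intro hmem
        have := List.length_pos_of_mem hmem
        omega
      unfold pvT
      rw [if_neg hnm]
      simp
    rw [hz]
    simp
  · rw [if_neg hn]
    congr 1
    have hgetD : L.map (fun ch => (PySem.Dict.counter N).getD ch 0)
        = L.map (fun ch => ((N.count ch : Nat) : Int)) :=
      List.map_congr_left (fun ch _ => by rw [PySem.Dict.getD_counter])
    rw [hgetD, sum_map_natCast L (pvT N), sum_map_natCast L (fun ch => N.count ch),
      show ((Nat.factorial N.length / pvDenom N : Nat) : Int) * (((L.map fun ch => N.count ch).sum : Nat) : Int)
        = ((((Nat.factorial N.length / pvDenom N) * (L.map fun ch => N.count ch).sum : Nat) : Nat) : Int)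
        by push_cast; ring,
      PySem.Int.floordiv_natCast,
      sum_hits N L, Nat.mul_div_cancel_left _ (Nat.pos_of_ne_zero hn)]
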